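-- pv_equiv track=rewrite | github.com/IanCBrown/practice_questions | connected_cells.py | maxRegion
-- ===== SOURCE A (Python) =====
-- def getRegionSize(grid, row, column):
--     if row < 0 or column < 0 or row >= len(grid) or column >= len(grid[row]):
--         return 0
--     if grid[row][column] == 0:
--         return 0
--
--     grid[row][column] = 0
--     size = 1
--
--     # in range row - 1 to row + 1
--     # use row + 2, bc range is exclusive
--     for r in range(row - 1, row + 2):
--         for c in range(column - 1, column + 2):
--             if r != row or c != column:
--                 size += getRegionSize(grid, r, c)
--     return size
--
-- def maxRegion(grid):
--     max_region = 0
--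
--     for row in range(len(grid)):
--         for col in range(len(grid[0])):
--             if grid[row][col] == 1:
--                 size = getRegionSize(grid, row, col)
--                 max_region = max(size, max_region)
--
--     return max_region
-- ===== SOURCE B (Python) =====
-- def maxRegion(grid):
--     # Iterative flood fill with an explicit stack instead of A's 8-way recursion.
--     # Mutates grid in place (zeroes visited cells), exactly like A.
--     best = 0
--     for row in range(len(grid)):
--         for col in range(len(grid[0])):
--             if grid[row][col] == 1:
--                 size = 0
--                 stack = [(row, col)]
--                 while stack:
--                     r, c = stack.pop()
--                     if 0 <= r < len(grid) and 0 <= c < len(grid[r]) and grid[r][c] != 0: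
--                         grid[r][c] = 0
--                         size += 1
--                         for dr in (1, 0, -1):
--                             for dc in (1, 0, -1):
--                                 if dr or dc:
--                                     stack.append((r + dr, c + dc))
--                 best = max(size, best)
--     return best
-- ===== Notes on version B (the rewrite author's own statement) =====
-- stated objective: idiomatic
-- what changed: The recursive 8-way getRegionSize helper is replaced by an inline iterative flood fill with an explicit stack (pop a cell, zero it, count it, push its eight neighbours), removing the recursion (and Python's recursion-depth limit) entirely.
import Mathlib
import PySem

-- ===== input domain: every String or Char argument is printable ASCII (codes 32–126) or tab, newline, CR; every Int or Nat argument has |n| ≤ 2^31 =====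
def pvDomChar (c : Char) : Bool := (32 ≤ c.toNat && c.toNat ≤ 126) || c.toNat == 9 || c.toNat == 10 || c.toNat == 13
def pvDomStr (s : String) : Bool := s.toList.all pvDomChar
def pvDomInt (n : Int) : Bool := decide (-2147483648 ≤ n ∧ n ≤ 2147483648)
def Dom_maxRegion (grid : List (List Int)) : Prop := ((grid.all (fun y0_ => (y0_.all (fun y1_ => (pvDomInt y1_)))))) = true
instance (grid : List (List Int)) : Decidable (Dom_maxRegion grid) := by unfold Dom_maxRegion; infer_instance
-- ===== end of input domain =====

-- B replaces A's recursive 8-way getRegionSize by an iterative explicit-stack flood fill;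
-- both mutate the grid in place identically (zero visited cells); return values proved equal.

-- ===== PORT A =====
-- shared grid primitives (Python's grid[r], grid[r][c], grid[r][c] = 0)
def pvRow (g : List (List Int)) (r : Int) : List Int := (PySem.List.pyGet? g r).getD []
def pvCell (g : List (List Int)) (r c : Int) : Int := (PySem.List.pyGet? (pvRow g r) c).getD 0
def pvZero (g : List (List Int)) (r c : Int) : List (List Int) :=
  g.set r.toNat ((pvRow g r).set c.toNat 0)
-- number of nonzero cells; used as (provably sufficient) fuel for A's recursion and as B's loop measure
def pvCount (g : List (List Int)) : Nat :=
  (g.map fun row => row.countP (fun x => decide (x ≠ 0))).sum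

-- the guard 'row < 0 or column < 0 or row >= len(grid) or column >= len(grid[row])'
def pvStop (g : List (List Int)) (r c : Int) : Bool :=
  decide (r < 0) || decide (c < 0) || decide ((g.length : Int) ≤ r) || decide (((pvRow g r).length : Int) ≤ c)

-- 'for r in range(row-1, row+2): for c in range(column-1, column+2): if r != row or c != column'
def nbrsA (row col : Int) : List (Int × Int) :=
  (PySem.List.pyRange (row - 1) (row + 2) 1).flatMap fun r =>
    ((PySem.List.pyRange (col - 1) (col + 2) 1).filter fun c =>
      decide (r ≠ row) || decide (c ≠ col)).map fun c => (r, c)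

mutual
-- getRegionSize: returns (size, mutated grid); fuel only guards termination (never exhausted: one
-- nonzero cell is zeroed before each deeper call, and the top call passes pvCount g + 1)
def dfsA : Nat → List (List Int) → Int → Int → Int × List (List Int)
  | 0, g, _, _ => (0, g)
  | fuel + 1, g, row, col =>
    if pvStop g row col then (0, g)
    else if pvCell g row col = 0 then (0, g)
    else
      let p := dfsListA fuel (pvZero g row col) (nbrsA row col)
      (1 + p.1, p.2)
  termination_by fuel _ _ _ => (fuel, 0)
-- the sequential 'size += getRegionSize(...)' over the 8 neighbours
def dfsListA : Nat → List (List Int) → List (Int × Int) → Int × List (List Int)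
  | _, g, [] => (0, g)
  | fuel, g, (r, c) :: rest =>
    let p := dfsA fuel g r c
    let q := dfsListA fuel p.2 rest
    (p.1 + q.1, q.2)
  termination_by fuel _ cells => (fuel, cells.length + 1)
end

def maxRegion (grid : List (List Int)) : Int :=
  ((PySem.List.pyRange 0 (grid.length : Int) 1).foldl (fun st row =>
     (PySem.List.pyRange 0 ((pvRow grid 0).length : Int) 1).foldl
       (fun (st : Int × List (List Int)) col =>
         if pvCell st.2 row col = 1 then
           let p := dfsA (pvCount st.2 + 1) st.2 row col
           (max p.1 st.1, p.2)
         else st) st) ((0 : Int), grid)).1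

-- ===== PORT B =====
-- the eight pushes 'for dr in (1,0,-1): for dc in (1,0,-1): if dr or dc: stack.append((r+dr,c+dc))'
def pushesB (r c : Int) : List (Int × Int) :=
  [(1 : Int), 0, -1].flatMap fun dr =>
    [(1 : Int), 0, -1].filterMap fun dc =>
      if dr ≠ 0 || dc ≠ 0 then some (r + dr, c + dc) else none

-- helper lemma cited by loopB's decreasing_by (stated here because the definition needs it)

-- counting lemmas (cited by loopB via pvCount_zero_lt, hence above the ports)


theorem pv_countP_set_zero (row : List Int) (m : Nat) (h : m < row.length) (hnz : row[m] ≠ 0) :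
    (row.set m 0).countP (fun x => decide (x ≠ 0)) < row.countP (fun x => decide (x ≠ 0)) := by
  induction row generalizing m with
  | nil => simp at h
  | cons x xs ih =>
    cases m with
    | zero => simp_all
    | succ m =>
      simp only [List.set_cons_succ, List.countP_cons]
      have := ih m (by simpa using h) (by simpa using hnz)
      omega

theorem pv_sum_map_set_lt (g : List (List Int)) (n : Nat) (v : List Int) (h : n < g.length)
    (hv : v.countP (fun x => decide (x ≠ 0)) < g[n].countP (fun x => decide (x ≠ 0))) :
    pvCount (g.set n v) < pvCount g := by
  induction g generalizing n with
  | nil => simp at h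
  | cons row rows ih =>
    cases n with
    | zero =>
      simp only [List.set_cons_zero, pvCount, List.map_cons, List.sum_cons]
      simp only [List.getElem_cons_zero] at hv
      omega
    | succ n =>
      simp only [List.set_cons_succ, pvCount, List.map_cons, List.sum_cons]
      have := ih n (by simpa using h) (by simpa using hv)
      simp only [pvCount] at this
      omega
theorem pvCount_zero_lt (g : List (List Int)) (r c : Int)
    (h0 : 0 ≤ r) (h1 : r < (g.length : Int)) (h2 : 0 ≤ c)
    (h3 : c < ((pvRow g r).length : Int)) (h4 : pvCell g r c ≠ 0) :
    pvCount (pvZero g r c) < pvCount g := by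
  have hn : r.toNat < g.length := by omega
  have hrow : pvRow g r = g[r.toNat] := by
    simp [pvRow, PySem.List.pyGet?_of_nonneg _ h0, List.getElem?_eq_getElem hn]
  have hm : c.toNat < (g[r.toNat] : List Int).length := by rw [hrow] at h3; omega
  have hcell : pvCell g r c = g[r.toNat][c.toNat] := by
    simp [pvCell, hrow, PySem.List.pyGet?_of_nonneg _ h2, List.getElem?_eq_getElem hm]
  rw [hcell] at h4
  unfold pvZero
  rw [hrow]
  exact pv_sum_map_set_lt g r.toNat _ hn (pv_countP_set_zero _ _ hm h4)

-- the 'while stack:' loop; Lean list head = Python stack top, so append-then-pop = reverse ++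
def loopB (g : List (List Int)) (stack : List (Int × Int)) (size : Int) : Int × List (List Int) :=
  match stack with
  | [] => (size, g)
  | (r, c) :: rest =>
    if h : (decide (0 ≤ r) && decide (r < (g.length : Int)) && decide (0 ≤ c)
            && decide (c < ((pvRow g r).length : Int)) && !(pvCell g r c == 0)) = true then
      loopB (pvZero g r c) ((pushesB r c).reverse ++ rest) (size + 1)
    else loopB g rest size
  termination_by (pvCount g, stack.length)
  decreasing_by
  · left
    simp only [Bool.and_eq_true, decide_eq_true_eq, Bool.not_eq_true', beq_eq_false_iff_ne] at h
    exact pvCount_zero_lt g r c h.1.1.1.1 h.1.1.1.2 h.1.1.2 h.1.2 h.2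
  · simp [Prod.lex_iff]

def maxRegion_alt (grid : List (List Int)) : Int :=
  ((PySem.List.pyRange 0 (grid.length : Int) 1).foldl (fun st row =>
     (PySem.List.pyRange 0 ((pvRow grid 0).length : Int) 1).foldl
       (fun (st : Int × List (List Int)) col =>
         if pvCell st.2 row col = 1 then
           let p := loopB st.2 [(row, col)] 0
           (max p.1 st.1, p.2)
         else st) st) ((0 : Int), grid)).1

-- ===== PRECONDITION & SPEC =====
-- Pre_ excludes exactly where Python A raises IndexError: grids with a row shorter
-- than row 0 (grid[row][col] in the outer scan goes out of range on that row).
def Pre_maxRegion (grid : List (List Int)) : Prop :=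
  ∀ row ∈ grid, (grid.headD []).length ≤ row.length
instance (grid : List (List Int)) : Decidable (Pre_maxRegion grid) := by
  unfold Pre_maxRegion; infer_instance
def pvWitness_maxRegion : List (List Int) := [[1, 0, 1], [0, 1, 0]]
def Spec_maxRegion (grid : List (List Int)) (out : Int) : Prop := out = maxRegion_alt grid
instance (grid : List (List Int)) (out : Int) : Decidable (Spec_maxRegion grid out) := by
  unfold Spec_maxRegion; infer_instance

-- ===== CLAIM (what is proved, stated in full; the proofs are below) =====
def Claim_equal_maxRegion : Prop := ∀ (grid : List (List Int)), Dom_maxRegion grid → Pre_maxRegion grid → Spec_maxRegion grid (maxRegion grid)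


-- unfolding lemmas for loopB
theorem loopB_nil (g : List (List Int)) (s : Int) : loopB g [] s = (s, g) := by
  rw [loopB]

theorem loopB_cons_skip (g : List (List Int)) (r c : Int) (rest : List (Int × Int)) (s : Int)
    (h : (decide (0 ≤ r) && decide (r < (g.length : Int)) && decide (0 ≤ c)
            && decide (c < ((pvRow g r).length : Int)) && !(pvCell g r c == 0)) = false) :
    loopB g ((r, c) :: rest) s = loopB g rest s := by
  rw [loopB]; simp [h]

theorem loopB_cons_step (g : List (List Int)) (r c : Int) (rest : List (Int × Int)) (s : Int)
    (h : (decide (0 ≤ r) && decide (r < (g.length : Int)) && decide (0 ≤ c)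
            && decide (c < ((pvRow g r).length : Int)) && !(pvCell g r c == 0)) = true) :
    loopB g ((r, c) :: rest) s = loopB (pvZero g r c) ((pushesB r c).reverse ++ rest) (s + 1) := by
  rw [loopB]; simp [h]

-- the guard of loopB in terms of A's stop test
theorem guardB_eq (g : List (List Int)) (r c : Int) :
    (decide (0 ≤ r) && decide (r < (g.length : Int)) && decide (0 ≤ c)
            && decide (c < ((pvRow g r).length : Int)) && !(pvCell g r c == 0))
      = (!pvStop g r c && !(pvCell g r c == 0)) := by
  congr 1
  rw [Bool.eq_iff_iff]
  simp only [pvStop, Bool.and_eq_true, Bool.not_eq_true', Bool.or_eq_false_iff,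
    decide_eq_true_eq, decide_eq_false_iff_not, not_lt, not_le]
  omega

-- count lemmas for dfsA/dfsListA
theorem mono_stop (g : List (List Int)) (r c : Int) (hs : pvStop g r c = false)
    (hc : pvCell g r c ≠ 0) : pvCount (pvZero g r c) < pvCount g := by
  simp only [pvStop, Bool.or_eq_false_iff, decide_eq_false_iff_not, not_lt, not_le] at hs
  exact pvCount_zero_lt g r c (by omega) (by omega) (by omega) (by omega) hc

theorem monoL_of (f : Nat)
    (hA : ∀ g r c, pvCount (dfsA f g r c).2 ≤ pvCount g) :
    ∀ (cells : List (Int × Int)) (g : List (List Int)),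
      pvCount (dfsListA f g cells).2 ≤ pvCount g := by
  intro cells
  induction cells with
  | nil => intro g; rw [dfsListA]
  | cons rc rest ih =>
    intro g
    obtain ⟨r, c⟩ := rc
    rw [dfsListA]
    exact le_trans (ih _) (hA g r c)

theorem monoA : ∀ (f : Nat) (g : List (List Int)) (r c : Int),
    pvCount (dfsA f g r c).2 ≤ pvCount g := by
  intro f
  induction f with
  | zero => intro g r c; rw [dfsA]
  | succ m ih =>
    intro g r c
    rw [dfsA]
    by_cases hs : pvStop g r c = true
    · simp [hs]
    · simp only [hs, Bool.false_eq_true, if_false]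
      by_cases hc : pvCell g r c = 0
      · simp [hc]
      · simp only [hc, if_false]
        have h1 := monoL_of m ih (nbrsA r c) (pvZero g r c)
        have h2 := mono_stop g r c (by simpa using hs) hc
        exact le_trans h1 (le_of_lt h2)

-- B's eight pushes, popped in order, are exactly A's neighbour list
theorem pushes_reverse_eq (r c : Int) : (pushesB r c).reverse = nbrsA r c := by
  have hr : PySem.List.pyRange (r - 1) (r + 2) 1 = [r - 1, r, r + 1] := by
    rw [PySem.List.pyRange_one_cons (by omega), PySem.List.pyRange_one_cons (by omega),
        PySem.List.pyRange_one_cons (by omega), PySem.List.pyRange_one_eq_nil (by omega)]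
    norm_num
  have hc : PySem.List.pyRange (c - 1) (c + 2) 1 = [c - 1, c, c + 1] := by
    rw [PySem.List.pyRange_one_cons (by omega), PySem.List.pyRange_one_cons (by omega),
        PySem.List.pyRange_one_cons (by omega), PySem.List.pyRange_one_eq_nil (by omega)]
    norm_num
  have h1 : r - 1 ≠ r := by omega
  have h2 : r + 1 ≠ r := by omega
  have h3 : c - 1 ≠ c := by omega
  have h4 : c + 1 ≠ c := by omega
  simp [pushesB, nbrsA, hr, hc, h1, h2, h3, h4]
  constructor <;> omega

-- MAIN SIMULATION: the explicit-stack loop computes exactly A's recursion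
theorem simL (f : Nat)
    (hsim : ∀ (g : List (List Int)) (r c : Int) (rest : List (Int × Int)) (acc : Int),
      pvCount g < f →
      loopB g ((r, c) :: rest) acc = loopB (dfsA f g r c).2 rest (acc + (dfsA f g r c).1)) :
    ∀ (cells : List (Int × Int)) (g : List (List Int)) (rest : List (Int × Int)) (acc : Int),
      pvCount g < f →
      loopB g (cells ++ rest) acc
        = loopB (dfsListA f g cells).2 rest (acc + (dfsListA f g cells).1) := by
  intro cells
  induction cells with
  | nil => intro g rest acc hf; rw [dfsListA]; simp
  | cons rc t ih =>
    intro g rest acc hf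
    obtain ⟨r, c⟩ := rc
    rw [dfsListA]
    simp only [List.cons_append]
    rw [hsim g r c (t ++ rest) acc hf]
    rw [ih (dfsA f g r c).2 rest (acc + (dfsA f g r c).1)
        (lt_of_le_of_lt (monoA f g r c) hf)]
    simp [add_assoc]

theorem simA : ∀ (f : Nat) (g : List (List Int)) (r c : Int) (rest : List (Int × Int)) (acc : Int),
    pvCount g < f →
    loopB g ((r, c) :: rest) acc = loopB (dfsA f g r c).2 rest (acc + (dfsA f g r c).1) := by
  intro f
  induction f with
  | zero => intro g r c rest acc hf; omega
  | succ m ih =>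
    intro g r c rest acc hf
    rw [dfsA]
    by_cases hs : pvStop g r c = true
    · simp only [hs, if_true]
      rw [loopB_cons_skip g r c rest acc (by rw [guardB_eq]; simp [hs])]
      simp
    · simp only [hs, Bool.false_eq_true, if_false]
      by_cases hc : pvCell g r c = 0
      · simp only [hc, if_true]
        rw [loopB_cons_skip g r c rest acc (by rw [guardB_eq]; simp [hc])]
        simp
      · simp only [hc, if_false]
        rw [loopB_cons_step g r c rest acc (by rw [guardB_eq]; simp [hs, hc])]
        rw [pushes_reverse_eq]
        have hs' : pvStop g r c = false := by simpa using hs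
        have hlt := mono_stop g r c hs' hc
        rw [simL m ih (nbrsA r c) (pvZero g r c) rest (acc + 1) (by omega)]
        simp [add_assoc]

-- one flood fill from a seed equals one recursive call with sufficient fuel
theorem flood_eq (g : List (List Int)) (r c : Int) :
    loopB g [(r, c)] 0 = dfsA (pvCount g + 1) g r c := by
  rw [simA (pvCount g + 1) g r c [] 0 (by omega), loopB_nil]
  simp

-- ===== VERDICT (by name: the statement is the Claim_ definition above) =====
theorem maxRegion_spec : Claim_equal_maxRegion := by
  unfold Claim_equal_maxRegion
  intro grid _ _
  unfold Spec_maxRegion maxRegion maxRegion_alt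
  congr 2
  funext st row
  congr 1
  funext st col
  by_cases h : pvCell st.2 row col = 1
  · simp only [h, if_true, flood_eq]
  · simp [h]
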